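-- pv_equiv track=rewrite | github.com/AtomicBot-ai/dflash | dflash/server.py | _safe_emit_split
-- ===== SOURCE A (Python) =====
-- _TOOL_CALL_START_MARKERS: tuple[str, ...] = (
--     "<tool_call>",
--     "<|tool_call|>",
--     "<|python_tag|>",
--     "[TOOL_CALLS]",
-- )
--
-- _TOOL_CALL_MAX_MARKER_LEN = max(len(m) for m in _TOOL_CALL_START_MARKERS)
--
-- def _safe_emit_split(accumulated_unsent: str) -> tuple[str, str]:
--     """Split unsent text into (safe_to_emit, hold_back) such that `hold_back`
--     keeps any trailing partial prefix of a tool-call start marker intact.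
--
--     Without this, we could leak the first characters of e.g. "<tool_call>" to
--     the client before realizing a tool call began, making downstream parsing
--     inconsistent.
--     """
--     if not accumulated_unsent:
--         return "", ""
--     hold = min(len(accumulated_unsent), _TOOL_CALL_MAX_MARKER_LEN)
--     for i in range(hold, 0, -1):
--         tail = accumulated_unsent[-i:]
--         if any(marker.startswith(tail) for marker in _TOOL_CALL_START_MARKERS):
--             return accumulated_unsent[:-i], tail
--     return accumulated_unsent, ""
-- ===== SOURCE B (Python) =====
-- _TOOL_CALL_START_MARKERS = (
--     "<tool_call>",
--     "<|tool_call|>",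
--     "<|python_tag|>",
--     "[TOOL_CALLS]",
-- )
--
--
-- def _overlap(text, marker):
--     """Largest k such that the last k chars of text equal marker[:k]."""
--     for k in range(min(len(text), len(marker)), 0, -1):
--         if text.endswith(marker[:k]):
--             return k
--     return 0
--
--
-- def _safe_emit_split(accumulated_unsent):
--     if not accumulated_unsent:
--         return "", ""
--     best = 0
--     for marker in _TOOL_CALL_START_MARKERS:
--         best = max(best, _overlap(accumulated_unsent, marker))
--     if best:
--         return accumulated_unsent[:-best], accumulated_unsent[-best:]
--     return accumulated_unsent, ""
-- ===== Notes on version B (the rewrite author's own statement) =====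
-- stated objective: alternative
-- what changed: Instead of scanning shrinking suffix lengths and testing every marker at each length with early return, B computes per marker the largest prefix-overlap with the text's tail and keeps a running maximum across the four markers.
import Mathlib
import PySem

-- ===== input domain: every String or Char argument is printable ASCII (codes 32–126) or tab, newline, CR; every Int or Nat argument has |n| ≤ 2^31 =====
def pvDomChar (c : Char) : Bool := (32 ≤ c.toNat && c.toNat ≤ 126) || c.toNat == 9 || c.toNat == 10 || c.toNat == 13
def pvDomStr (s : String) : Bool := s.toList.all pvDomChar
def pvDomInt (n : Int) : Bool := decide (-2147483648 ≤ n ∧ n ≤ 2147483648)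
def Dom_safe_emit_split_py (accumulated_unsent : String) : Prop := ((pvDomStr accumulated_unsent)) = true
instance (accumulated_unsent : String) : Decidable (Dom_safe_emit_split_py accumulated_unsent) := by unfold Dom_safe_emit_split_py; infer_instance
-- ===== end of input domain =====

-- B replaces A's scan over shrinking suffix lengths (testing all markers at each
-- length, early return) by a per-marker largest-overlap computation folded with a
-- running maximum; same cost, different decomposition (objective: alternative).

-- ===== PORT A =====
def tool_call_start_markers : List String :=
  ["<tool_call>", "<|tool_call|>", "<|python_tag|>", "[TOOL_CALLS]"]

-- max(len(m) for m in _TOOL_CALL_START_MARKERS); .getD 0 is unreachable (literal list nonempty)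
def tool_call_max_marker_len : Int :=
  (PySem.List.max? (tool_call_start_markers.map PySem.Str.len) id).getD 0

-- the 'for i in range(hold, 0, -1)' loop of A, with its early return
def safe_emit_split_loop (s : String) : List Int → String × String
  | [] => (s, "")
  | i :: rest =>
    let tail := PySem.Str.slice s (some (-i)) none
    if tool_call_start_markers.any (fun m => PySem.Str.startswith m tail) then
      (PySem.Str.slice s none (some (-i)), tail)
    else
      safe_emit_split_loop s rest

def safe_emit_split_py (accumulated_unsent : String) : String × String :=
  if accumulated_unsent.toList = [] then ("", "")
  else
    let hold : Int := min (PySem.Str.len accumulated_unsent) tool_call_max_marker_len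
    safe_emit_split_loop accumulated_unsent (PySem.List.pyRange hold 0 (-1))

-- ===== PORT B =====
-- the 'for k in range(min(len(text), len(marker)), 0, -1)' loop of B's _overlap
def overlap_loop (text marker : String) : List Int → Int
  | [] => 0
  | k :: rest =>
    if PySem.Str.endswith text (PySem.Str.slice marker none (some k)) then k
    else overlap_loop text marker rest

def overlap (text marker : String) : Int :=
  overlap_loop text marker
    (PySem.List.pyRange (min (PySem.Str.len text) (PySem.Str.len marker)) 0 (-1))

def safe_emit_split_py_alt (accumulated_unsent : String) : String × String :=
  if accumulated_unsent.toList = [] then ("", "")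
  else
    let best : Int :=
      tool_call_start_markers.foldl (fun b m => max b (overlap accumulated_unsent m)) 0
    if best ≠ 0 then
      (PySem.Str.slice accumulated_unsent none (some (-best)),
       PySem.Str.slice accumulated_unsent (some (-best)) none)
    else (accumulated_unsent, "")

-- ===== PRECONDITION & SPEC =====
def Spec_safe_emit_split_py (accumulated_unsent : String) (out : String × String) : Prop := out = safe_emit_split_py_alt accumulated_unsent
instance (accumulated_unsent : String) (out : String × String) : Decidable (Spec_safe_emit_split_py accumulated_unsent out) := by unfold Spec_safe_emit_split_py; infer_instance

-- ===== CLAIM (what is proved, stated in full; the proofs are below) =====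
def Claim_equal_safe_emit_split_py : Prop := ∀ (accumulated_unsent : String), Dom_safe_emit_split_py accumulated_unsent → Spec_safe_emit_split_py accumulated_unsent (safe_emit_split_py accumulated_unsent)

-- ===== LEMMAS AND PROOFS =====

-- greatest i in 1..n with p i, else 0
def pvGreatest (p : Nat → Bool) : Nat → Nat
  | 0 => 0
  | n+1 => if p (n+1) then n+1 else pvGreatest p n

lemma pvGreatest_le (p : Nat → Bool) (n : Nat) : pvGreatest p n ≤ n := by
  induction n with
  | zero => simp [pvGreatest]
  | succ n ih => unfold pvGreatest; split <;> omega

lemma pvGreatest_spec (p : Nat → Bool) (n : Nat) :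
    pvGreatest p n = 0 ∨ p (pvGreatest p n) = true := by
  induction n with
  | zero => left; rfl
  | succ n ih =>
    unfold pvGreatest; split
    · right; assumption
    · exact ih

lemma pvGreatest_ge (p : Nat → Bool) (n i : Nat) (hi : i ≤ n) (hp : p i = true) :
    i ≤ pvGreatest p n := by
  induction n with
  | zero => omega
  | succ n ih =>
    unfold pvGreatest; split
    · omega
    · rename_i hfalse
      rcases Nat.lt_or_ge i (n+1) with h | h
      · exact ih (by omega)
      · exfalso; have : i = n + 1 := by omega
        subst this; simp [hp] at hfalse

lemma pvGreatest_congr (p q : Nat → Bool) (n : Nat)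
    (h : ∀ i, 1 ≤ i → i ≤ n → p i = q i) : pvGreatest p n = pvGreatest q n := by
  induction n with
  | zero => rfl
  | succ n ih =>
    unfold pvGreatest
    rw [h (n+1) (by omega) (by omega)]
    split
    · rfl
    · exact ih (fun i h1 h2 => h i h1 (by omega))

lemma pv_foldl_max_le {α : Type} (l : List α) (f : α → Nat) (b c : Nat)
    (hb : b ≤ c) (h : ∀ x ∈ l, f x ≤ c) :
    l.foldl (fun acc x => max acc (f x)) b ≤ c := by
  induction l generalizing b with
  | nil => simpa using hb
  | cons a l ih =>
    simp only [List.foldl_cons]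
    exact ih _ (by have := h a (by simp); omega) (fun x hx => h x (by simp [hx]))

lemma pv_foldl_max_init_le {α : Type} (l : List α) (f : α → Nat) (b : Nat) :
    b ≤ l.foldl (fun acc y => max acc (f y)) b := by
  induction l generalizing b with
  | nil => simp
  | cons a l ih =>
    simp only [List.foldl_cons]
    exact le_trans (Nat.le_max_left _ _) (ih _)

lemma pv_le_foldl_max {α : Type} (l : List α) (f : α → Nat) (b : Nat) (x : α) (hx : x ∈ l) :
    f x ≤ l.foldl (fun acc y => max acc (f y)) b := by
  induction l generalizing b with
  | nil => simp at hx
  | cons a l ih =>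
    simp only [List.foldl_cons]
    rcases List.mem_cons.mp hx with rfl | hx
    · exact le_trans (Nat.le_max_right _ _) (pv_foldl_max_init_le _ _ _)
    · exact ih _ hx

lemma pvGreatest_any_eq {α : Type} (ms : List α) (q : α → Nat → Bool) (cap : α → Nat) (n : Nat)
    (h1 : ∀ m ∈ ms, cap m ≤ n)
    (h2 : ∀ m ∈ ms, ∀ k, k ≤ n → q m k = true → k ≤ cap m) :
    pvGreatest (fun i => ms.any (fun m => q m i)) n
      = ms.foldl (fun b m => max b (pvGreatest (q m) (cap m))) 0 := by
  apply Nat.le_antisymm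
  · rcases pvGreatest_spec (fun i => ms.any (fun m => q m i)) n with h0 | hp
    · rw [h0]; exact Nat.zero_le _
    · simp only [List.any_eq_true] at hp
      rcases hp with ⟨m, hm, hq⟩
      have hG := pvGreatest_le (fun i => ms.any (fun m => q m i)) n
      have hcap := h2 m hm _ hG hq
      have hge := pvGreatest_ge (q m) (cap m) _ hcap hq
      exact le_trans hge (pv_le_foldl_max ms (fun m => pvGreatest (q m) (cap m)) 0 m hm)
  · apply pv_foldl_max_le _ _ _ _ (Nat.zero_le _)
    intro m hm
    rcases pvGreatest_spec (q m) (cap m) with h0 | hp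
    · rw [h0]; exact Nat.zero_le _
    · apply pvGreatest_ge
      · exact le_trans (pvGreatest_le _ _) (h1 m hm)
      · simp only [List.any_eq_true]; exact ⟨m, hm, hp⟩

-- semantic condition: the last i chars of t equal the first i chars of marker m
def pvR (t : List Char) (m : String) (i : Nat) : Bool :=
  decide (i ≤ m.toList.length) && decide (t.drop (t.length - i) = m.toList.take i)

-- A's loop condition at suffix length i
def pvPA (s : String) (i : Nat) : Bool :=
  tool_call_start_markers.any
    (fun m => PySem.Str.startswith m (PySem.Str.slice s (some (-(i:Int))) none))

-- B's loop condition at prefix length k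
def pvQB (s m : String) (k : Nat) : Bool :=
  PySem.Str.endswith s (PySem.Str.slice m none (some (k:Int)))

lemma pv_slice_neg_from (s : String) (i : Nat) (h1 : 1 ≤ i) (h2 : i ≤ s.toList.length) :
    (PySem.Str.slice s (some (-(i:Int))) none).toList
      = s.toList.drop (s.toList.length - i) := by
  have h : (PySem.Str.slice s (some (-(i:Int))) none).toList
      = PySem.List.slice s.toList (some (-(i:Int))) none := by simp
  rw [h, PySem.List.slice_some_none]
  congr 1
  have hl : s.toList.length = s.length := String.length_toList
  simp only [PySem.List.clampIdx]
  split_ifs <;> omega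

lemma pv_slice_to_cast (s : String) (k : Nat) :
    (PySem.Str.slice s none (some (k:Int))).toList = s.toList.take k := by
  have h : (PySem.Str.slice s none (some (k:Int))).toList
      = PySem.List.slice s.toList none (some (k:Int)) := by simp
  rw [h]
  have hl : s.toList.length = s.length := String.length_toList
  simp only [PySem.List.slice, PySem.List.clampIdx]
  rw [List.drop_zero]
  rw [List.take_eq_take_iff]
  split_ifs <;> omega

lemma pv_bridgeA (s : String) (i : Nat) (h1 : 1 ≤ i) (h2 : i ≤ s.toList.length) :
    pvPA s i = tool_call_start_markers.any (fun m => pvR s.toList m i) := by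
  rw [Bool.eq_iff_iff]
  simp only [pvPA, pvR, List.any_eq_true]
  refine exists_congr fun m => and_congr_right fun _ => ?_
  rw [PySem.Str.startswith_eq, PySem.Chars.startswith_iff, pv_slice_neg_from s i h1 h2]
  have hlen : (s.toList.drop (s.toList.length - i)).length = i := by
    rw [List.length_drop]; omega
  rw [List.prefix_iff_eq_take, hlen]
  simp only [Bool.and_eq_true, decide_eq_true_eq]
  constructor
  · intro h
    have : i ≤ m.toList.length := by
      have := congrArg List.length h
      rw [hlen, List.length_take] at this
      omega
    exact ⟨this, h⟩
  · exact fun h => h.2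

lemma pv_bridgeB (s m : String) (k : Nat) (hk : k ≤ m.toList.length) :
    pvQB s m k = pvR s.toList m k := by
  rw [Bool.eq_iff_iff]
  simp only [pvQB, pvR, Bool.and_eq_true, decide_eq_true_eq]
  rw [PySem.Str.endswith_eq, PySem.Chars.endswith_iff, pv_slice_to_cast m k]
  have hlen : (m.toList.take k).length = k := by rw [List.length_take]; omega
  rw [List.suffix_iff_eq_drop, hlen]
  constructor
  · exact fun h => ⟨hk, h.symm⟩
  · exact fun h => h.2.symm

lemma pv_loopA_eq (s : String) (n : Nat) :
    safe_emit_split_loop s (PySem.List.pyRange (n:Int) 0 (-1)) =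
      (if pvGreatest (pvPA s) n = 0 then (s, "")
       else (PySem.Str.slice s none (some (-((pvGreatest (pvPA s) n : Nat) : Int))),
             PySem.Str.slice s (some (-((pvGreatest (pvPA s) n : Nat) : Int))) none)) := by
  induction n with
  | zero =>
    rw [PySem.List.pyRange_neg_one_eq_nil (by norm_num)]
    rfl
  | succ n ih =>
    rw [PySem.List.pyRange_neg_one_cons (by exact_mod_cast Nat.succ_pos n)]
    have hc : ((n+1:Nat):Int) - 1 = (n:Int) := by push_cast; ring
    rw [hc]
    simp only [safe_emit_split_loop, pvGreatest]
    cases hp : pvPA s (n+1) with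
    | true =>
      have hp' := hp
      simp only [pvPA] at hp'
      rw [hp']
      simp
    | false =>
      have hp' := hp
      simp only [pvPA] at hp'
      rw [hp']
      simp [ih]

lemma pv_loopB_eq (s m : String) (c : Nat) :
    overlap_loop s m (PySem.List.pyRange (c:Int) 0 (-1))
      = ((pvGreatest (pvQB s m) c : Nat) : Int) := by
  induction c with
  | zero =>
    rw [PySem.List.pyRange_neg_one_eq_nil (by norm_num)]
    rfl
  | succ c ih =>
    rw [PySem.List.pyRange_neg_one_cons (by exact_mod_cast Nat.succ_pos c)]
    have hc : ((c+1:Nat):Int) - 1 = (c:Int) := by push_cast; ring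
    rw [hc]
    simp only [overlap_loop, pvGreatest]
    cases hq : pvQB s m (c+1) with
    | true =>
      have hq' := hq
      simp only [pvQB] at hq'
      rw [hq']
      simp
    | false =>
      have hq' := hq
      simp only [pvQB] at hq'
      rw [hq']
      simp [ih]

lemma pv_foldl_max_cast (l : List String) (f : String → Nat) (b : Nat) :
    l.foldl (fun acc m => max acc ((f m : Nat) : Int)) ((b:Nat):Int)
      = ((l.foldl (fun acc m => max acc (f m)) b : Nat) : Int) := by
  induction l generalizing b with
  | nil => rfl
  | cons a l ih =>
    simp only [List.foldl_cons]
    rw [← Nat.cast_max, ih]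

-- ===== VERDICT (by name: the statement is the Claim_ definition above) =====
theorem safe_emit_split_py_spec : Claim_equal_safe_emit_split_py := by
  intro s _
  unfold Spec_safe_emit_split_py
  by_cases hs : s.toList = []
  · simp [safe_emit_split_py, safe_emit_split_py_alt, hs]
  · have hL : 1 ≤ s.toList.length := by
      cases h : s.toList with
      | nil => exact absurd h hs
      | cons a t => simp
    have hmax : tool_call_max_marker_len = 14 := by decide
    have hhold : min (PySem.Str.len s) tool_call_max_marker_len
        = ((min s.toList.length 14 : Nat) : Int) := by
      rw [PySem.Str.len_eq, hmax, Nat.cast_min]; norm_num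
    have hA : pvGreatest (pvPA s) (min s.toList.length 14)
        = tool_call_start_markers.foldl
            (fun b m => max b (pvGreatest (pvQB s m) (min s.toList.length m.toList.length))) 0 := by
      rw [pvGreatest_congr (pvPA s)
            (fun i => tool_call_start_markers.any (fun m => pvR s.toList m i)) _
            (fun i hi1 hi2 => pv_bridgeA s i hi1 (by omega))]
      rw [pvGreatest_any_eq tool_call_start_markers (fun m k => pvR s.toList m k)
            (fun m => min s.toList.length m.toList.length) (min s.toList.length 14)
            (by intro m hm; fin_cases hm <;> simp)
            (by intro m hm k hk hq
                simp only [pvR, Bool.and_eq_true, decide_eq_true_eq] at hq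
                show k ≤ min s.toList.length m.toList.length
                omega)]
      have hq : ∀ m : String,
          pvGreatest (fun k => pvR s.toList m k) (min s.toList.length m.toList.length)
            = pvGreatest (pvQB s m) (min s.toList.length m.toList.length) :=
        fun m => pvGreatest_congr _ _ _ (fun k hk1 hk2 => (pv_bridgeB s m k (by omega)).symm)
      simp only [hq]
    have hov : ∀ m : String,
        overlap s m = ((pvGreatest (pvQB s m) (min s.toList.length m.toList.length) : Nat) : Int) := by
      intro m
      rw [overlap]
      have hm : min (PySem.Str.len s) (PySem.Str.len m)
          = ((min s.toList.length m.toList.length : Nat) : Int) := by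
        rw [PySem.Str.len_eq, PySem.Str.len_eq, Nat.cast_min]
      rw [hm, pv_loopB_eq]
    have hbest : tool_call_start_markers.foldl (fun b m => max b (overlap s m)) 0
        = ((pvGreatest (pvPA s) (min s.toList.length 14) : Nat) : Int) := by
      simp only [hov]
      have h0 : (0:Int) = ((0:Nat):Int) := rfl
      rw [h0, pv_foldl_max_cast tool_call_start_markers
            (fun m => pvGreatest (pvQB s m) (min s.toList.length m.toList.length)) 0, hA]
    simp only [safe_emit_split_py, safe_emit_split_py_alt, if_neg hs]
    rw [hhold, pv_loopA_eq, hbest]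
    by_cases hg : pvGreatest (pvPA s) (min s.toList.length 14) = 0
    · rw [if_pos hg, hg]
      norm_num
    · rw [if_neg hg, if_pos (Nat.cast_ne_zero.mpr hg)]
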